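-- pv_equiv track=rewrite | github.com/OldRazeJedy/DM_Labs | Lab_2/Proj/main.py | eulerian_path_or_cycle
-- ===== SOURCE A (Python) =====
-- import copy
--
-- def eulerian_path_or_cycle(matrix, n):
--     if any(sum(1 for x in w if x > 0) % 2 == 1 for w in matrix):
--         return None
--
--     path = []
--     stack = [0]
--     copy_matrix = copy.deepcopy(matrix)
--     while stack:
--         vertex = stack[-1]
--         if any(copy_matrix[vertex]):
--             next_vertex = min([i for i, v in enumerate(copy_matrix[vertex]) if v])
--             stack.append(next_vertex)
--             copy_matrix[vertex][next_vertex] = 0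
--             copy_matrix[next_vertex][vertex] = 0
--         else:
--             path.append(stack.pop())
--
--     path.reverse()
--     return path
-- ===== SOURCE B (Python) =====
-- def eulerian_path_or_cycle(matrix, n):
--     if any(sum(1 for x in w if x > 0) % 2 == 1 for w in matrix):
--         return None
--
--     # Hierholzer by cycle splicing: keep a finished path; while some vertex on
--     # it still has unused edges, greedily walk a closed circuit from the LAST
--     # such position and splice the circuit in at that position.
--     adj = [[j for j, v in enumerate(row) if v] for row in matrix]
--     path = [0]
--     while True:
--         i = next((k for k in range(len(path) - 1, -1, -1) if adj[path[k]]), None)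
--         if i is None:
--             return path
--         w = path[i]
--         circuit = [w]
--         while adj[w]:
--             u = adj[w].pop(0)
--             if w in adj[u]:
--                 adj[u].remove(w)
--             circuit.append(u)
--             w = u
--         path[i : i + 1] = circuit
-- ===== Notes on version B (the rewrite author's own statement) =====
-- stated objective: alternative
-- what changed: B replaces A's stack-driven Hierholzer (push/pop on a vertex stack over a mutated matrix, path collected in pop order and reversed) by the cycle-splicing Hierholzer over adjacency lists: it keeps a finished path, repeatedly scans it from the end for the last vertex with unused edges, walks one greedy closed circuit from there and splices it in; no vertex stack and no final reverse.
-- outside the precondition, e.g. on eulerian_path_or_cycle([[1, 1], [1, 1], [0, 0]], 3): A returns [0, 0, 1, 1], B returns [0, 0, 1, 1]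
import Mathlib
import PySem

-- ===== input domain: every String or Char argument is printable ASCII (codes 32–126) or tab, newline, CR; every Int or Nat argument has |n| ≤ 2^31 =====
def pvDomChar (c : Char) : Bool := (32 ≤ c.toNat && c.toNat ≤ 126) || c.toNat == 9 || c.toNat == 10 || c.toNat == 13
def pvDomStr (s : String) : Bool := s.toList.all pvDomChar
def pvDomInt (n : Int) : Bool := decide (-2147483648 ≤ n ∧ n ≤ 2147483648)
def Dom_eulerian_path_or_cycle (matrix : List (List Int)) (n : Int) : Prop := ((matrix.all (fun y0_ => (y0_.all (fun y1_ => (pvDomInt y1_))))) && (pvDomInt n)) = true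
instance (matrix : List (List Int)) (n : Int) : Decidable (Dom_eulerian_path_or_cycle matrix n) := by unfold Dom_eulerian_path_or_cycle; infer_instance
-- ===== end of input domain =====

-- B replaces A's stack-driven Hierholzer by the cycle-splicing variant over adjacency
-- lists (splice a greedy circuit at the last path position with unused edges).

-- ===== PORT A =====

-- [i for i, v in enumerate(row) if v]  (Python int truthiness: v != 0); this identical
-- comprehension occurs in BOTH Pythons (inside A's min(...), and in B's adjacency builder)
def pvNbrsAux (s : Int) (row : List Int) : List Int :=
  ((PySem.List.enumerate row s).filter (fun p => p.2 != 0)).map (fun p => p.1)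

-- number of nonzero matrix entries: only used for the loops' fuel
def pvCnt (r : List Int) : Nat := (r.filter (fun v => v != 0)).length

def pvCountNz (cm : List (List Int)) : Nat := (cm.map pvCnt).sum

-- while-loop of A: stack top at the head, path accumulated left-to-right (reversed at the
-- end).  The fuel argument only makes the recursion structural: each iteration either
-- removes a nonzero entry or pops the stack, so 2·(nonzero entries)+2 iterations always
-- suffice and the fuel never runs out on the loop A actually executes.
def pvLoopA : Nat → List (List Int) → List Int → List Int → List Int
  | 0, _, _, path => path
  | fuel + 1, cm, stack, path =>
    match stack with
    | [] => path
    | vertex :: rest =>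
      let row := PySem.List.pyGetD cm vertex []
      if row.any (fun v => v != 0) then
        -- next_vertex = min([i for i, v in enumerate(row) if v])  (guard ensures nonempty)
        let next := (PySem.List.min? (pvNbrsAux 0 row) (fun x => x)).getD 0
        let cm1 := PySem.List.pySetD cm vertex (PySem.List.pySetD row next 0)
        let cm2 := PySem.List.pySetD cm1 next
          (PySem.List.pySetD (PySem.List.pyGetD cm1 next []) vertex 0)
        pvLoopA fuel cm2 (next :: vertex :: rest) path
      else
        pvLoopA fuel cm rest (path ++ [vertex])

def eulerian_path_or_cycle (matrix : List (List Int)) (n : Int) : Option (List Int) :=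
  if matrix.any (fun w => (w.countP (fun x => 0 < x)) % 2 == 1) then none
  else some ((pvLoopA (2 * pvCountNz matrix + 2) matrix [0] []).reverse)

-- ===== PORT B =====

-- total number of adjacency-list entries: only used for the loops' fuel
def pvAL (adj : List (List Int)) : Nat := (adj.map List.length).sum

-- inner while-loop of B: greedily walk from w (always to the least remaining neighbour,
-- the head of the sorted adjacency list), removing each traversed edge in both
-- directions, until stuck; returns the circuit walked and the updated lists.
-- Fuel: each step shortens one adjacency list, so (total entries) steps suffice.
def pvWalk : Nat → List (List Int) → Int → List Int → List Int × List (List Int)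
  | 0, adj, _, circ => (circ, adj)
  | fuel + 1, adj, w, circ =>
    match PySem.List.pyGetD adj w [] with
    | [] => (circ, adj)
    | u :: tl =>
      let adj1 := PySem.List.pySetD adj w tl
      let ru := PySem.List.pyGetD adj1 u []
      let adj2 := if w ∈ ru then PySem.List.pySetD adj1 u (ru.erase w) else adj1
      pvWalk fuel adj2 u (circ ++ [u])

-- next((k for k in range(len(path)-1, -1, -1) if adj[path[k]]), None)
def pvScan (adj : List (List Int)) (path : List Int) : Option Int :=
  (PySem.List.pyRange ((path.length : Int) - 1) (-1) (-1)).find?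
    (fun k => !(PySem.List.pyGetD adj (PySem.List.pyGetD path k 0) []).isEmpty)

-- outer while-loop of B: find the last path position with remaining edges, walk a
-- circuit from it, splice it in (path[i:i+1] = circuit).
def pvLoopC : Nat → List (List Int) → List Int → List Int
  | 0, _, path => path
  | fuel + 1, adj, path =>
    match pvScan adj path with
    | none => path
    | some i =>
      let w := PySem.List.pyGetD path i 0
      let res := pvWalk fuel adj w [w]
      pvLoopC fuel res.2
        (PySem.List.slice path none (some i) ++ res.1 ++
         PySem.List.slice path (some (i + 1)) none)

def eulerian_path_or_cycle_alt (matrix : List (List Int)) (n : Int) : Option (List Int) :=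
  if matrix.any (fun w => (w.countP (fun x => 0 < x)) % 2 == 1) then none
  else
    let adj := matrix.map (fun row => pvNbrsAux 0 row)
    some (pvLoopC (2 * pvAL adj + 2) adj [0])

-- ===== PRECONDITION & SPEC =====
-- Pre_ admits every matrix with a row of odd positive-count (A answers None before indexing),
-- every nonempty square matrix, and every nonempty matrix whose first row is all zero (the walk
-- stops immediately); it excludes the empty and the remaining non-square matrices, on which A's
-- index arithmetic can raise IndexError (always on []) and on which a return is an accident of
-- the traversal staying in range.
def Pre_eulerian_path_or_cycle (matrix : List (List Int)) (n : Int) : Prop :=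
  (∃ w ∈ matrix, (w.countP (fun x => 0 < x)) % 2 = 1) ∨
  (matrix ≠ [] ∧ ∀ row ∈ matrix, row.length = matrix.length) ∨
  (∃ r, matrix.head? = some r ∧ ∀ x ∈ r, x = 0)
instance (matrix : List (List Int)) (n : Int) : Decidable (Pre_eulerian_path_or_cycle matrix n) := by
  unfold Pre_eulerian_path_or_cycle; infer_instance

def pvWitness_eulerian_path_or_cycle : List (List Int) × Int := ([[0, 1], [1, 0]], 2)

def Spec_eulerian_path_or_cycle (matrix : List (List Int)) (n : Int) (out : Option (List Int)) : Prop := out = eulerian_path_or_cycle_alt matrix n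
instance (matrix : List (List Int)) (n : Int) (out : Option (List Int)) : Decidable (Spec_eulerian_path_or_cycle matrix n out) := by unfold Spec_eulerian_path_or_cycle; infer_instance

-- ===== CLAIM (what is proved, stated in full; the proofs are below) =====
def Claim_equal_eulerian_path_or_cycle : Prop := ∀ (matrix : List (List Int)) (n : Int), Dom_eulerian_path_or_cycle matrix n → Pre_eulerian_path_or_cycle matrix n → Spec_eulerian_path_or_cycle matrix n (eulerian_path_or_cycle matrix n)

-- ===== LEMMAS AND PROOFS =====

theorem pv_aux_nil (s : Int) : pvNbrsAux s [] = [] := by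
  simp [pvNbrsAux, PySem.List.enumerate]

theorem pv_aux_cons (s x : Int) (xs : List Int) :
    pvNbrsAux s (x :: xs) =
      if x != 0 then s :: pvNbrsAux (s + 1) xs else pvNbrsAux (s + 1) xs := by
  simp only [pvNbrsAux, PySem.List.enumerate_cons, List.filter_cons]
  split <;> simp_all

theorem pv_aux_mem_iff (s j : Int) (row : List Int) :
    j ∈ pvNbrsAux s row ↔ ∃ (k : Nat) (_ : k < row.length), j = s + k ∧ row[k] ≠ 0 := by
  induction row generalizing s with
  | nil => simp [pv_aux_nil]
  | cons x xs ih =>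
    rw [pv_aux_cons]
    by_cases hx : (x != 0) = true
    · rw [if_pos hx, List.mem_cons, ih]
      constructor
      · rintro (rfl | ⟨k, hk, rfl, hnz⟩)
        · exact ⟨0, by simp, by simp, by simpa using hx⟩
        · exact ⟨k + 1, by simpa using Nat.succ_lt_succ hk, by push_cast; ring,
            by simpa using hnz⟩
      · rintro ⟨k, hk, hj, hnz⟩
        cases k with
        | zero => left; simpa using hj
        | succ k =>
          right
          exact ⟨k, Nat.lt_of_succ_lt_succ (by simpa using hk),
            by rw [hj]; push_cast; ring, by simpa using hnz⟩
    · rw [if_neg hx, ih]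
      have hx0 : x = 0 := by simpa using hx
      constructor
      · rintro ⟨k, hk, rfl, hnz⟩
        exact ⟨k + 1, by simpa using Nat.succ_lt_succ hk, by push_cast; ring,
          by simpa using hnz⟩
      · rintro ⟨k, hk, hj, hnz⟩
        cases k with
        | zero =>
            rw [List.getElem_cons_zero, hx0] at hnz
            exact absurd rfl hnz
        | succ k =>
          exact ⟨k, Nat.lt_of_succ_lt_succ (by simpa using hk),
            by rw [hj]; push_cast; ring, by simpa using hnz⟩

theorem pv_aux_lb (s j : Int) (row : List Int) (h : j ∈ pvNbrsAux s row) : s ≤ j := by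
  obtain ⟨k, hk, rfl, _⟩ := (pv_aux_mem_iff s j row).mp h
  omega

theorem pv_pyGetD_nonneg {α : Type} (xs : List α) (i : Int) (d : α) (h : 0 ≤ i) :
    PySem.List.pyGetD xs i d = xs.getD i.toNat d := by
  by_cases h2 : i < (xs.length : Int)
  · rw [PySem.List.pyGetD_eq_getElem xs d h h2]
    simp [List.getD_eq_getElem?_getD,
      List.getElem?_eq_getElem (show i.toNat < xs.length by omega)]
  · have hnone : PySem.List.pyGet? xs i = none :=
      (PySem.List.pyGet?_eq_none_iff _ _).mpr (by unfold PySem.Raise.InRange; omega)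
    rw [PySem.List.pyGetD_of_none _ _ _ hnone, List.getD_eq_getElem?_getD,
      List.getElem?_eq_none (by omega)]
    rfl

theorem pv_aux_pairwise (s : Int) (row : List Int) :
    (pvNbrsAux s row).Pairwise (· < ·) := by
  induction row generalizing s with
  | nil => simp [pv_aux_nil]
  | cons x xs ih =>
    rw [pv_aux_cons]
    split
    · exact List.Pairwise.cons (fun y hy => by have := pv_aux_lb (s + 1) y xs hy; omega) (ih (s + 1))
    · exact ih (s + 1)

theorem pv_aux_nil_iff (s : Int) (row : List Int) :
    pvNbrsAux s row = [] ↔ row.any (fun v => v != 0) = false := by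
  induction row generalizing s with
  | nil => simp [pv_aux_nil]
  | cons x xs ih =>
    rw [pv_aux_cons]
    by_cases hx : (x != 0) = true
    · simp [hx]
    · have hx0 : x = 0 := by simpa using hx
      simp [hx0, ih]

theorem pv_aux_set (s : Int) (row : List Int) (k : Nat) :
    pvNbrsAux s (row.set k 0) = (pvNbrsAux s row).erase (s + k) := by
  induction row generalizing s k with
  | nil => simp [pv_aux_nil]
  | cons x xs ih =>
    cases k with
    | zero =>
      simp only [List.set_cons_zero, Nat.cast_zero, add_zero]
      rw [pv_aux_cons, pv_aux_cons]
      simp only [bne_self_eq_false, Bool.false_eq_true, if_false]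
      split
      · rw [List.erase_cons_head]
      · exact (List.erase_of_not_mem (fun hmem => by
          have := pv_aux_lb (s + 1) s xs hmem; omega)).symm
    | succ k =>
      simp only [List.set_cons_succ]
      rw [pv_aux_cons, pv_aux_cons]
      have hcast : s + ((k + 1 : Nat) : Int) = (s + 1) + (k : Int) := by push_cast; ring
      split
      · rw [List.erase_cons_tail (by simp; omega)]
        rw [ih (s + 1) k, hcast]
      · rw [ih (s + 1) k, hcast]

theorem pv_foldl_min (t : List Int) (x : Int) (h : ∀ y ∈ t, x ≤ y) :
    t.foldl min x = x := by
  induction t generalizing x with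
  | nil => rfl
  | cons a t ih =>
    rw [List.foldl_cons, min_eq_left (h a (by simp))]
    exact ih x (fun y hy => h y (by simp [hy]))

theorem pv_aux_min (row : List Int) (u : Int) (tl : List Int)
    (h : pvNbrsAux 0 row = u :: tl) :
    (PySem.List.min? (pvNbrsAux 0 row) (fun x => x)).getD 0 = u := by
  have hp := pv_aux_pairwise 0 row
  rw [h] at hp ⊢
  rw [PySem.List.min?_id_cons, Option.getD_some]
  exact pv_foldl_min tl u (fun y hy => le_of_lt ((List.pairwise_cons.mp hp).1 y hy))

theorem pv_getD_oor {α : Type} (l : List α) (k : Nat) (d : α) (h : l.length ≤ k) :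
    l.getD k d = d := by
  rw [List.getD_eq_getElem?_getD, List.getElem?_eq_none h]; rfl

theorem pv_getD_map {α β : Type} (f : α → β) (cm : List α) (k : Nat) (d : α) (d' : β)
    (hk : k < cm.length) : (cm.map f).getD k d' = f (cm.getD k d) := by
  rw [List.getD_eq_getElem?_getD, List.getD_eq_getElem?_getD,
    List.getElem?_eq_getElem (by simpa using hk), List.getElem?_eq_getElem hk]
  simp

theorem pv_set_self {α : Type} (l : List α) (k : Nat) (hk : k < l.length) :
    l.set k l[k] = l := by
  apply List.ext_getElem (by simp)
  intro i h1 h2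
  rw [List.getElem_set]
  split
  · rename_i hik; subst hik; rfl
  · rfl

-- one-step equations for A's loop
theorem pvLoopA_step_pos (fuel : Nat) (cm : List (List Int)) (vertex : Int)
    (rest path : List Int)
    (h : ((PySem.List.pyGetD cm vertex []).any fun v => v != 0) = true) :
    pvLoopA (fuel + 1) cm (vertex :: rest) path =
      pvLoopA fuel
        (PySem.List.pySetD
          (PySem.List.pySetD cm vertex
            (PySem.List.pySetD (PySem.List.pyGetD cm vertex [])
              ((PySem.List.min? (pvNbrsAux 0 (PySem.List.pyGetD cm vertex [])) (fun x => x)).getD 0) 0))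
          ((PySem.List.min? (pvNbrsAux 0 (PySem.List.pyGetD cm vertex [])) (fun x => x)).getD 0)
          (PySem.List.pySetD
            (PySem.List.pyGetD
              (PySem.List.pySetD cm vertex
                (PySem.List.pySetD (PySem.List.pyGetD cm vertex [])
                  ((PySem.List.min? (pvNbrsAux 0 (PySem.List.pyGetD cm vertex [])) (fun x => x)).getD 0) 0))
              ((PySem.List.min? (pvNbrsAux 0 (PySem.List.pyGetD cm vertex [])) (fun x => x)).getD 0) [])
            vertex 0))
        (((PySem.List.min? (pvNbrsAux 0 (PySem.List.pyGetD cm vertex [])) (fun x => x)).getD 0)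
          :: vertex :: rest) path := by
  simp only [pvLoopA]
  rw [if_pos h]

theorem pvLoopA_step_neg (fuel : Nat) (cm : List (List Int)) (vertex : Int)
    (rest path : List Int)
    (h : ¬ ((PySem.List.pyGetD cm vertex []).any fun v => v != 0) = true) :
    pvLoopA (fuel + 1) cm (vertex :: rest) path = pvLoopA fuel cm rest (path ++ [vertex]) := by
  simp only [pvLoopA]
  rw [if_neg h]

theorem pvLoopA_nil (fuel : Nat) (cm : List (List Int)) (path : List Int) :
    pvLoopA fuel cm [] path = path := by
  cases fuel <;> rfl

-- one-step equations for B's inner walk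
theorem pvWalk_step_nil (fuel : Nat) (adj : List (List Int)) (w : Int) (circ : List Int)
    (h : PySem.List.pyGetD adj w [] = []) :
    pvWalk (fuel + 1) adj w circ = (circ, adj) := by
  simp only [pvWalk]
  rw [h]

theorem pvWalk_step_cons (fuel : Nat) (adj : List (List Int)) (w u : Int) (tl : List Int)
    (circ : List Int) (h : PySem.List.pyGetD adj w [] = u :: tl) :
    pvWalk (fuel + 1) adj w circ =
      pvWalk fuel
        (if w ∈ PySem.List.pyGetD (PySem.List.pySetD adj w tl) u [] then
          PySem.List.pySetD (PySem.List.pySetD adj w tl) u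
            ((PySem.List.pyGetD (PySem.List.pySetD adj w tl) u []).erase w)
        else PySem.List.pySetD adj w tl)
        u (circ ++ [u]) := by
  simp only [pvWalk]
  rw [h]

-- the row of cm.map (pvNbrsAux 0) at an in-range index
theorem pv_rowB (cm : List (List Int)) (v : Int) (hv0 : 0 ≤ v) (hv : v.toNat < cm.length) :
    PySem.List.pyGetD (cm.map (fun row => pvNbrsAux 0 row)) v [] =
      pvNbrsAux 0 (PySem.List.pyGetD cm v []) := by
  rw [pv_pyGetD_nonneg _ _ _ hv0, pv_pyGetD_nonneg _ _ _ hv0,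
    pv_getD_map _ cm v.toNat [] [] hv]

-- one edge-removal step commutes with taking adjacency lists (core correspondence)
theorem pv_adj_step (cm : List (List Int)) (vertex u : Int) (tl : List Int)
    (hv0 : 0 ≤ vertex) (hu0 : 0 ≤ u)
    (haux : pvNbrsAux 0 (PySem.List.pyGetD cm vertex []) = u :: tl)
    (hvlen : vertex.toNat < cm.length) :
    (if vertex ∈ PySem.List.pyGetD
        (PySem.List.pySetD (cm.map (fun row => pvNbrsAux 0 row)) vertex tl) u [] then
      PySem.List.pySetD (PySem.List.pySetD (cm.map (fun row => pvNbrsAux 0 row)) vertex tl) u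
        ((PySem.List.pyGetD
          (PySem.List.pySetD (cm.map (fun row => pvNbrsAux 0 row)) vertex tl) u []).erase vertex)
    else PySem.List.pySetD (cm.map (fun row => pvNbrsAux 0 row)) vertex tl) =
    (PySem.List.pySetD
      (PySem.List.pySetD cm vertex (PySem.List.pySetD (PySem.List.pyGetD cm vertex []) u 0)) u
      (PySem.List.pySetD
        (PySem.List.pyGetD
          (PySem.List.pySetD cm vertex
            (PySem.List.pySetD (PySem.List.pyGetD cm vertex []) u 0)) u [])
        vertex 0)).map (fun row => pvNbrsAux 0 row) := by
  have hu_mem : u ∈ pvNbrsAux 0 (PySem.List.pyGetD cm vertex []) := by rw [haux]; simp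
  obtain ⟨ku, hku, hueq, hunz⟩ := (pv_aux_mem_iff 0 u _).mp hu_mem
  have hgetv : PySem.List.pyGetD cm vertex [] = cm.getD vertex.toNat [] :=
    pv_pyGetD_nonneg cm vertex [] hv0
  have hE1 : PySem.List.pySetD (PySem.List.pyGetD cm vertex []) u 0 =
      (PySem.List.pyGetD cm vertex []).set ku 0 := by
    rw [PySem.List.pySetD_of_nonneg _ _ hu0]
    congr 1
    omega
  have hE3 : pvNbrsAux 0 ((PySem.List.pyGetD cm vertex []).set ku 0) = tl := by
    rw [pv_aux_set, haux]
    have : (0:Int) + (ku : Int) = u := by omega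
    rw [this, List.erase_cons_head]
  have hE2 : PySem.List.pySetD cm vertex (PySem.List.pySetD (PySem.List.pyGetD cm vertex []) u 0) =
      cm.set vertex.toNat ((PySem.List.pyGetD cm vertex []).set ku 0) := by
    rw [PySem.List.pySetD_of_nonneg _ _ hv0, hE1]
  have hE4 : PySem.List.pySetD (cm.map (fun row => pvNbrsAux 0 row)) vertex tl =
      (cm.set vertex.toNat ((PySem.List.pyGetD cm vertex []).set ku 0)).map
        (fun row => pvNbrsAux 0 row) := by
    rw [PySem.List.pySetD_of_nonneg _ _ hv0, List.map_set, hE3]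
  rw [hE2, hE4]
  set cm1' := cm.set vertex.toNat ((PySem.List.pyGetD cm vertex []).set ku 0) with hcm1'
  have hlen1 : cm1'.length = cm.length := by simp [hcm1']
  by_cases hku2 : u.toNat < cm.length
  · have hrow2 : PySem.List.pyGetD cm1' u [] = cm1'.getD u.toNat [] :=
      pv_pyGetD_nonneg cm1' u [] hu0
    have hru : PySem.List.pyGetD (cm1'.map (fun row => pvNbrsAux 0 row)) u [] =
        pvNbrsAux 0 (cm1'.getD u.toNat []) := by
      rw [pv_pyGetD_nonneg _ _ _ hu0, pv_getD_map _ cm1' u.toNat [] [] (by omega)]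
    have hinner : PySem.List.pySetD (PySem.List.pyGetD cm1' u []) vertex 0 =
        (cm1'.getD u.toNat []).set vertex.toNat 0 := by
      rw [PySem.List.pySetD_of_nonneg _ _ hv0, hrow2]
    have hfinner : pvNbrsAux 0 ((cm1'.getD u.toNat []).set vertex.toNat 0) =
        (pvNbrsAux 0 (cm1'.getD u.toNat [])).erase vertex := by
      rw [pv_aux_set]
      congr 1
      omega
    have hRHS : (PySem.List.pySetD cm1' u
        (PySem.List.pySetD (PySem.List.pyGetD cm1' u []) vertex 0)).map
          (fun row => pvNbrsAux 0 row) =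
        (cm1'.map (fun row => pvNbrsAux 0 row)).set u.toNat
          ((pvNbrsAux 0 (cm1'.getD u.toNat [])).erase vertex) := by
      rw [hinner, PySem.List.pySetD_of_nonneg _ _ hu0, List.map_set, hfinner]
    rw [hRHS, hru]
    by_cases hmem : vertex ∈ pvNbrsAux 0 (cm1'.getD u.toNat [])
    · rw [if_pos hmem, PySem.List.pySetD_of_nonneg _ _ hu0]
    · rw [if_neg hmem, List.erase_of_not_mem hmem]
      have hgetel : (cm1'.map (fun row => pvNbrsAux 0 row))[u.toNat]'(by
          simpa [hlen1] using hku2) = pvNbrsAux 0 (cm1'.getD u.toNat []) := by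
        rw [List.getElem_map]
        congr 1
        rw [List.getD_eq_getElem?_getD, List.getElem?_eq_getElem (by omega)]
        rfl
      rw [← hgetel, pv_set_self _ _ (by simpa [hlen1] using hku2)]
  · have hrow2 : PySem.List.pyGetD cm1' u [] = [] := by
      rw [pv_pyGetD_nonneg _ _ _ hu0]
      exact pv_getD_oor _ _ _ (by omega)
    have hru : PySem.List.pyGetD (cm1'.map (fun row => pvNbrsAux 0 row)) u [] = [] := by
      rw [pv_pyGetD_nonneg _ _ _ hu0]
      exact pv_getD_oor _ _ _ (by simpa using by omega)
    rw [hru, if_neg (by simp), hrow2]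
    have : PySem.List.pySetD ([] : List Int) vertex 0 = [] := by
      rw [PySem.List.pySetD_of_nonneg _ _ hv0]; rfl
    rw [this, PySem.List.pySetD_of_nonneg _ _ hu0,
      List.set_eq_of_length_le (by omega)]

theorem pv_aux_length (s : Int) (row : List Int) : (pvNbrsAux s row).length = pvCnt row := by
  induction row generalizing s with
  | nil => simp [pv_aux_nil, pvCnt]
  | cons x xs ih =>
    rw [pv_aux_cons]
    simp only [pvCnt, List.filter_cons]
    split
    · simpa [pvCnt] using ih (s + 1)
    · simpa [pvCnt] using ih (s + 1)

theorem pv_fuel_eq (matrix : List (List Int)) :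
    pvAL (matrix.map (fun row => pvNbrsAux 0 row)) = pvCountNz matrix := by
  unfold pvAL
  rw [List.map_map, pvCountNz]
  congr 1
  exact List.map_congr_left (fun row _ => pv_aux_length 0 row)

-- ===== sum/AL bookkeeping =====

theorem pv_sum_set (l : List Nat) (k : Nat) (x : Nat) (hk : k < l.length) :
    (l.set k x).sum + l[k] = l.sum + x := by
  induction l generalizing k with
  | nil => simp at hk
  | cons a l ih =>
    cases k with
    | zero => simp; omega
    | succ k =>
      have := ih k (by simpa using hk)
      simp only [List.set_cons_succ, List.sum_cons, List.getElem_cons_succ]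
      omega

theorem pv_AL_set (adj : List (List Int)) (k : Int) (r : List Int)
    (hk0 : 0 ≤ k) (hk : k.toNat < adj.length) :
    pvAL (PySem.List.pySetD adj k r) + (PySem.List.pyGetD adj k []).length =
      pvAL adj + r.length := by
  rw [PySem.List.pySetD_of_nonneg _ _ hk0, pv_pyGetD_nonneg _ _ _ hk0]
  unfold pvAL
  rw [List.map_set]
  have h := pv_sum_set (adj.map List.length) k.toNat r.length (by simpa using hk)
  have he : (adj.map List.length)[k.toNat]'(by simpa using hk) =
      (adj.getD k.toNat []).length := by
    rw [List.getElem_map, List.getD_eq_getElem?_getD, List.getElem?_eq_getElem hk]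
    rfl
  rw [he] at h
  omega

theorem pv_getD_set_ne (adj : List (List Int)) (a : Int) (r : List Int) (x : Int)
    (hx0 : 0 ≤ x) (ha0 : 0 ≤ a) (hne : x ≠ a) :
    PySem.List.pyGetD (PySem.List.pySetD adj a r) x [] = PySem.List.pyGetD adj x [] := by
  rw [PySem.List.pySetD_of_nonneg _ _ ha0, pv_pyGetD_nonneg _ _ _ hx0,
    pv_pyGetD_nonneg _ _ _ hx0, List.getD_eq_getElem?_getD, List.getD_eq_getElem?_getD,
    List.getElem?_set_ne (by omega)]

theorem pv_find_desc_none (m : Nat) (a : Int) (p : Int → Bool) (hm : a < m)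
    (h : ∀ k : Int, 0 ≤ k → k ≤ a → p k = false) :
    (PySem.List.pyRange a (-1) (-1)).find? p = none := by
  induction m generalizing a with
  | zero =>
    rw [PySem.List.pyRange_neg_one_eq_nil (by omega)]
    rfl
  | succ m ih =>
    by_cases ha : a < 0
    · rw [PySem.List.pyRange_neg_one_eq_nil (by omega)]
      rfl
    · rw [PySem.List.pyRange_neg_one_cons (by omega), List.find?_cons_of_neg
        (by simp [h a (by omega) (le_refl a)])]
      exact ih (a - 1) (by omega) (fun k hk0 hka => h k hk0 (by omega))

theorem pv_find_desc_some (m : Nat) (a i : Int) (p : Int → Bool) (hm : a < m)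
    (hi0 : 0 ≤ i) (hia : i ≤ a)
    (h : ∀ k : Int, i < k → k ≤ a → p k = false) (hp : p i = true) :
    (PySem.List.pyRange a (-1) (-1)).find? p = some i := by
  induction m generalizing a with
  | zero => omega
  | succ m ih =>
    rw [PySem.List.pyRange_neg_one_cons (by omega)]
    by_cases hai : a = i
    · subst hai
      rw [List.find?_cons_of_pos (by simpa using hp)]
    · rw [List.find?_cons_of_neg (by simp [h a (by omega) (le_refl a)])]
      exact ih (a - 1) (by omega) (by omega) (fun k hk0 hka => h k hk0 (by omega))

theorem pv_scan_none (adj : List (List Int)) (path : List Int)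
    (h : ∀ x ∈ path, PySem.List.pyGetD adj x [] = []) :
    pvScan adj path = none := by
  unfold pvScan
  apply pv_find_desc_none (path.length + 1) _ _ (by push_cast; omega)
  intro k hk0 hka
  have hmem : PySem.List.pyGetD path k 0 ∈ path := by
    refine PySem.List.pyGetD_mem path 0 ?_
    unfold PySem.Raise.InRange
    omega
  simp [h _ hmem]

theorem pv_getD_append_mid (p1 : List Int) (v : Int) (q : List Int) :
    PySem.List.pyGetD (p1 ++ v :: q) (p1.length : Int) 0 = v := by
  rw [pv_pyGetD_nonneg _ _ _ (by omega), Int.toNat_natCast, List.getD_eq_getElem?_getD,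
    List.getElem?_append_right (le_refl p1.length)]
  simp

theorem pv_scan_some (adj : List (List Int)) (p1 : List Int) (v : Int) (q : List Int)
    (hv : PySem.List.pyGetD adj v [] ≠ [])
    (hq : ∀ x ∈ q, PySem.List.pyGetD adj x [] = []) :
    pvScan adj (p1 ++ v :: q) = some (p1.length : Int) := by
  unfold pvScan
  have hlen : (p1 ++ v :: q).length = p1.length + 1 + q.length := by
    simp [List.length_append]
    omega
  apply pv_find_desc_some ((p1 ++ v :: q).length + 1) _ _ _ (by push_cast; omega)
    (by omega) (by rw [hlen]; push_cast; omega)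
  · intro k hk1 hk2
    rw [hlen] at hk2
    have hk0 : 0 ≤ k := by omega
    have hel : PySem.List.pyGetD (p1 ++ v :: q) k 0 ∈ q := by
      rw [pv_pyGetD_nonneg _ _ _ hk0, List.getD_eq_getElem?_getD,
        List.getElem?_append_right (by omega)]
      have h1 : k.toNat - p1.length = (k.toNat - p1.length - 1) + 1 := by omega
      rw [h1, List.getElem?_cons_succ]
      have h2 : k.toNat - p1.length - 1 < q.length := by omega
      rw [List.getElem?_eq_getElem h2]
      exact List.getElem_mem h2
    simp [hq _ hel]
  · rw [pv_getD_append_mid]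
    simp [List.isEmpty_eq_false_iff, hv]

theorem pv_sq_pySetD (cm : List (List Int)) (i : Int) (r : List Int) (n : Nat)
    (h : ∀ row ∈ cm, row.length = n) (hr : r.length = n) (hi0 : 0 ≤ i) :
    ∀ row ∈ PySem.List.pySetD cm i r, row.length = n := by
  rw [PySem.List.pySetD_of_nonneg _ _ hi0]
  intro row hmem
  rcases List.mem_or_eq_of_mem_set hmem with h1 | rfl
  · exact h row h1
  · exact hr

-- ===== the walk simulates A's push phase =====

theorem pv_walk (fW : Nat) : ∀ (cm : List (List Int)) (w : Int) (acc : List Int),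
    (∀ row ∈ cm, row.length = cm.length) →
    0 ≤ w → w.toNat < cm.length →
    pvAL (cm.map (fun row => pvNbrsAux 0 row)) ≤ fW →
    ∃ (pushed : List Int) (cm' : List (List Int)),
      pvWalk fW (cm.map (fun row => pvNbrsAux 0 row)) w acc = (acc ++ pushed, cm'.map (fun row => pvNbrsAux 0 row)) ∧
      (∀ (g : Nat) (rest pathA : List Int),
        pvLoopA (g + pushed.length) cm (w :: rest) pathA =
          pvLoopA g cm' (pushed.reverse ++ w :: rest) pathA) ∧
      cm'.length = cm.length ∧
      (∀ row ∈ cm', row.length = cm'.length) ∧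
      (∀ x ∈ pushed, 0 ≤ x ∧ x.toNat < cm.length) ∧
      (∀ x : Int, 0 ≤ x → x.toNat < cm.length →
        PySem.List.pyGetD (cm.map (fun row => pvNbrsAux 0 row)) x [] = [] →
        PySem.List.pyGetD (cm'.map (fun row => pvNbrsAux 0 row)) x [] = []) ∧
      pvAL (cm'.map (fun row => pvNbrsAux 0 row)) + pushed.length ≤
        pvAL (cm.map (fun row => pvNbrsAux 0 row)) ∧
      (PySem.List.pyGetD (cm.map (fun row => pvNbrsAux 0 row)) w [] ≠ [] → pushed ≠ []) := by
  induction fW with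
  | zero =>
    intro cm w acc hsq hw0 hw hf
    have hAL0 : pvAL (cm.map (fun row => pvNbrsAux 0 row)) = 0 := by omega
    have hrow : PySem.List.pyGetD (cm.map (fun row => pvNbrsAux 0 row)) w [] = [] := by
      rw [pv_pyGetD_nonneg _ _ _ hw0]
      have hmem : (cm.map (fun row => pvNbrsAux 0 row)).getD w.toNat [] ∈
          cm.map (fun row => pvNbrsAux 0 row) := by
        rw [List.getD_eq_getElem?_getD,
          List.getElem?_eq_getElem (by simpa using hw)]
        exact List.getElem_mem _
      have hsum : ((cm.map (fun row => pvNbrsAux 0 row)).map List.length).sum = 0 := hAL0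
      have hzz := List.sum_eq_zero_iff.mp hsum _ (List.mem_map_of_mem hmem)
      exact List.eq_nil_of_length_eq_zero hzz
    exact ⟨[], cm, by simp [pvWalk], by intro g rest pathA; simp, rfl, hsq, by simp,
      fun x _ _ h => h, by simp, fun hne => absurd hrow hne⟩
  | succ fW ih =>
    intro cm w acc hsq hw0 hw hf
    cases hrow : PySem.List.pyGetD (cm.map (fun row => pvNbrsAux 0 row)) w [] with
    | nil =>
      exact ⟨[], cm, by rw [pvWalk_step_nil _ _ _ _ hrow]; simp,
        by intro g rest pathA; simp, rfl, hsq, by simp,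
        fun x _ _ h => h, by simp, fun hne => absurd rfl hne⟩
    | cons u tl =>
      have hauxrow : pvNbrsAux 0 (PySem.List.pyGetD cm w []) = u :: tl := by
        rw [← pv_rowB cm w hw0 hw]; exact hrow
      have hu_mem : u ∈ pvNbrsAux 0 (PySem.List.pyGetD cm w []) := by rw [hauxrow]; simp
      obtain ⟨ku, hku, hueq, _⟩ := (pv_aux_mem_iff 0 u _).mp hu_mem
      have hu0 : (0:Int) ≤ u := by omega
      have hrowlen : (PySem.List.pyGetD cm w []).length = cm.length := by
        rw [pv_pyGetD_nonneg _ _ _ hw0]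
        apply hsq
        rw [List.getD_eq_getElem?_getD, List.getElem?_eq_getElem hw]
        exact List.getElem_mem _
      have hu : u.toNat < cm.length := by omega
      -- the one-step updated matrix (exactly A's update)
      set cm2 := PySem.List.pySetD
          (PySem.List.pySetD cm w (PySem.List.pySetD (PySem.List.pyGetD cm w []) u 0)) u
          (PySem.List.pySetD
            (PySem.List.pyGetD
              (PySem.List.pySetD cm w
                (PySem.List.pySetD (PySem.List.pyGetD cm w []) u 0)) u [])
            w 0) with hcm2
      have hstep : (if w ∈ PySem.List.pyGetD
            (PySem.List.pySetD (cm.map (fun row => pvNbrsAux 0 row)) w tl) u [] then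
          PySem.List.pySetD (PySem.List.pySetD (cm.map (fun row => pvNbrsAux 0 row)) w tl) u
            ((PySem.List.pyGetD
              (PySem.List.pySetD (cm.map (fun row => pvNbrsAux 0 row)) w tl) u []).erase w)
        else PySem.List.pySetD (cm.map (fun row => pvNbrsAux 0 row)) w tl) =
          cm2.map (fun row => pvNbrsAux 0 row) :=
        pv_adj_step cm w u tl hw0 hu0 hauxrow hw
      -- lengths of cm2
      have hlen2 : cm2.length = cm.length := by
        rw [hcm2]
        simp [PySem.List.length_pySetD]
      have hsq1 : ∀ row ∈ PySem.List.pySetD cm w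
          (PySem.List.pySetD (PySem.List.pyGetD cm w []) u 0), row.length = cm.length := by
        apply pv_sq_pySetD _ _ _ _ hsq _ hw0
        rw [PySem.List.length_pySetD]
        exact hrowlen
      have hlen1 : (PySem.List.pySetD cm w
          (PySem.List.pySetD (PySem.List.pyGetD cm w []) u 0)).length = cm.length := by
        rw [PySem.List.length_pySetD]
      have hsq2 : ∀ row ∈ cm2, row.length = cm2.length := by
        rw [hcm2, hlen2]
        apply pv_sq_pySetD _ _ _ _ hsq1 _ hu0
        rw [PySem.List.length_pySetD]
        apply hsq1
        refine PySem.List.pyGetD_mem _ [] ?_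
        unfold PySem.Raise.InRange
        rw [hlen1]
        omega
      -- AL decreases by at least one
      have hwadj : w.toNat < (cm.map (fun row => pvNbrsAux 0 row)).length := by simpa using hw
      have hAL1 : pvAL (PySem.List.pySetD (cm.map (fun row => pvNbrsAux 0 row)) w tl) + 1 =
          pvAL (cm.map (fun row => pvNbrsAux 0 row)) := by
        have := pv_AL_set (cm.map (fun row => pvNbrsAux 0 row)) w tl hw0 hwadj
        rw [hrow] at this
        simp only [List.length_cons] at this
        omega
      have hAL2 : pvAL (cm2.map (fun row => pvNbrsAux 0 row)) + 1 ≤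
          pvAL (cm.map (fun row => pvNbrsAux 0 row)) := by
        rw [← hstep]
        split
        · rename_i hmm
          have huadj : u.toNat <
              (PySem.List.pySetD (cm.map (fun row => pvNbrsAux 0 row)) w tl).length := by
            rw [PySem.List.length_pySetD]
            simpa using hu
          have h2 := pv_AL_set (PySem.List.pySetD (cm.map (fun row => pvNbrsAux 0 row)) w tl) u
            ((PySem.List.pyGetD (PySem.List.pySetD (cm.map (fun row => pvNbrsAux 0 row)) w tl) u []).erase w)
            hu0 huadj
          have h3 := List.length_erase_of_mem hmm
          omega
        · omega
      -- invoke the induction hypothesis after the step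
      obtain ⟨pushed', cm', hwalk', hloopA', hlen', hsq', hrange', hpres', hAL', -⟩ :=
        ih cm2 u (acc ++ [u]) hsq2 hu0 (by omega) (by omega)
      refine ⟨u :: pushed', cm', ?_, ?_, by omega, hsq', ?_, ?_, ?_, fun _ => by simp⟩
      · rw [pvWalk_step_cons _ _ _ _ _ _ hrow, hstep, hwalk']
        simp
      · intro g rest pathA
        have hany : ((PySem.List.pyGetD cm w []).any fun v => v != 0) = true := by
          cases hb : ((PySem.List.pyGetD cm w []).any fun v => v != 0) with
          | false => rw [(pv_aux_nil_iff 0 _).mpr hb] at hauxrow; simp at hauxrow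
          | true => rfl
        have hg : g + (u :: pushed').length = (g + pushed'.length) + 1 := by
          simp only [List.length_cons]
          omega
        rw [hg, pvLoopA_step_pos _ _ _ _ _ hany, pv_aux_min _ u tl hauxrow, ← hcm2,
          hloopA' g (w :: rest) pathA]
        simp
      · intro x hx
        rcases List.mem_cons.mp hx with rfl | hx'
        · exact ⟨hu0, hu⟩
        · have := hrange' x hx'
          omega
      · intro x hx0 hxlen hxdead
        have hxw : x ≠ w := by
          intro h
          rw [h, hrow] at hxdead
          simp at hxdead
        have hdead1 : PySem.List.pyGetD
            (PySem.List.pySetD (cm.map (fun row => pvNbrsAux 0 row)) w tl) x [] = [] := by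
          rw [pv_getD_set_ne _ _ _ _ hx0 hw0 hxw]
          exact hxdead
        have hdead2 : PySem.List.pyGetD (cm2.map (fun row => pvNbrsAux 0 row)) x [] = [] := by
          rw [← hstep]
          split
          · rename_i hmm
            by_cases hxu : x = u
            · subst hxu
              rw [hdead1] at hmm
              simp at hmm
            · rw [pv_getD_set_ne _ _ _ _ hx0 hu0 hxu]
              exact hdead1
          · exact hdead1
        exact hpres' x hx0 (by omega) hdead2
      · simp only [List.length_cons]
        omega

-- ===== main correspondence: A's loop vs B's splice loop =====

theorem pv_main_nil (adj : List (List Int)) (pathA : List Int) (fB : Nat)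
    (hdead : ∀ x ∈ pathA, PySem.List.pyGetD adj x [] = []) (hfB : 1 ≤ fB) :
    pathA.reverse = pvLoopC fB adj pathA.reverse := by
  obtain ⟨f, rfl⟩ : ∃ f, fB = f + 1 := ⟨fB - 1, by omega⟩
  simp only [pvLoopC]
  rw [pv_scan_none _ _ (fun x hx => hdead x (List.mem_reverse.mp hx))]

theorem pv_main (μ : Nat) : ∀ (cm : List (List Int)) (stack pathA : List Int) (fA fB : Nat),
    (∀ row ∈ cm, row.length = cm.length) →
    (∀ x ∈ stack, 0 ≤ x ∧ x.toNat < cm.length) →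
    (∀ x ∈ pathA, 0 ≤ x ∧ x.toNat < cm.length) →
    (∀ x ∈ pathA, PySem.List.pyGetD (cm.map (fun row => pvNbrsAux 0 row)) x [] = []) →
    2 * pvAL (cm.map (fun row => pvNbrsAux 0 row)) + stack.length ≤ μ →
    2 * pvAL (cm.map (fun row => pvNbrsAux 0 row)) + stack.length ≤ fA →
    pvAL (cm.map (fun row => pvNbrsAux 0 row)) + 1 ≤ fB →
    (pvLoopA fA cm stack pathA).reverse =
      pvLoopC fB (cm.map (fun row => pvNbrsAux 0 row)) (stack.reverse ++ pathA.reverse) := by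
  induction μ with
  | zero =>
    intro cm stack pathA fA fB hsq hstack hpath hdead hμ hfA hfB
    have hnil : stack = [] := by
      cases stack with
      | nil => rfl
      | cons a l => simp at hμ
    subst hnil
    rw [pvLoopA_nil]
    simpa using pv_main_nil _ pathA fB hdead (by omega)
  | succ μ ih =>
    intro cm stack pathA fA fB hsq hstack hpath hdead hμ hfA hfB
    cases stack with
    | nil =>
      rw [pvLoopA_nil]
      simpa using pv_main_nil _ pathA fB hdead (by omega)
    | cons v rest =>
      have hv := hstack v (List.mem_cons_self)
      by_cases hrow : PySem.List.pyGetD (cm.map (fun row => pvNbrsAux 0 row)) v [] = []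
      · -- pop step: the spliced path is unchanged
        have hrow' := hrow
        rw [pv_rowB cm v hv.1 hv.2] at hrow'
        have hany : ((PySem.List.pyGetD cm v []).any fun x => x != 0) = false :=
          (pv_aux_nil_iff 0 _).mp hrow'
        obtain ⟨f, rfl⟩ : ∃ f, fA = f + 1 := ⟨fA - 1, by simp at hfA; omega⟩
        rw [pvLoopA_step_neg _ _ _ _ _ (by simp [hany])]
        have := ih cm rest (pathA ++ [v]) f fB hsq
          (fun x hx => hstack x (List.mem_cons_of_mem _ hx))
          (by
            intro x hx
            rcases List.mem_append.mp hx with hx' | hx'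
            · exact hpath x hx'
            · simp at hx'
              subst hx'
              exact hv)
          (by
            intro x hx
            rcases List.mem_append.mp hx with hx' | hx'
            · exact hdead x hx'
            · simp at hx'
              subst hx'
              exact hrow)
          (by simp at hμ ⊢; omega) (by simp at hfA ⊢; omega) hfB
        rw [this]
        congr 1
        simp
      · -- splice step: B finds v (the last live position), walks A's push phase
        obtain ⟨fB', rfl⟩ : ∃ f, fB = f + 1 := ⟨fB - 1, by omega⟩
        obtain ⟨pushed, cm', hwalkeq, hloopA, hlen', hsq', hrange', hpres', hAL', hne'⟩ :=
          pv_walk fB' cm v [v] hsq hv.1 hv.2 (by omega)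
        have hk1 : pushed ≠ [] := hne' hrow
        have hk : 1 ≤ pushed.length := by
          cases pushed with
          | nil => exact absurd rfl hk1
          | cons a l => simp
        have hkAL : pushed.length ≤ pvAL (cm.map (fun row => pvNbrsAux 0 row)) := by omega
        -- A side: contract the push phase
        have hfa : fA = (fA - pushed.length) + pushed.length := by
          simp at hfA
          omega
        have hAside := hloopA (fA - pushed.length) rest pathA
        rw [← hfa] at hAside
        rw [hAside]
        -- B side: one splice iteration
        have hP : (v :: rest).reverse ++ pathA.reverse =
            rest.reverse ++ v :: pathA.reverse := by simp
        rw [hP]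
        simp only [pvLoopC]
        rw [pv_scan_some _ rest.reverse v pathA.reverse hrow
          (fun x hx => hdead x (List.mem_reverse.mp hx))]
        simp only []
        rw [pv_getD_append_mid rest.reverse v pathA.reverse, hwalkeq]
        have hslice1 : PySem.List.slice (rest.reverse ++ v :: pathA.reverse) none
            (some (rest.reverse.length : Int)) = rest.reverse := by
          rw [PySem.List.slice_to_natCast, List.take_left]
        have hslice2 : PySem.List.slice (rest.reverse ++ v :: pathA.reverse)
            (some ((rest.reverse.length : Int) + 1)) none = pathA.reverse := by
          have hc : (rest.reverse.length : Int) + 1 = ((rest.reverse.length + 1 : Nat) : Int) := by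
            push_cast
            ring
          rw [hc, PySem.List.slice_from_natCast]
          have : rest.reverse ++ v :: pathA.reverse =
              (rest.reverse ++ [v]) ++ pathA.reverse := by simp
          have hlen : rest.reverse.length + 1 = (rest.reverse ++ [v]).length := by simp
          rw [this, hlen, List.drop_left]
        rw [hslice1, hslice2]
        have := ih cm' (pushed.reverse ++ v :: rest) pathA (fA - pushed.length) fB' hsq'
          (by
            intro x hx
            rcases List.mem_append.mp hx with hx' | hx'
            · have := hrange' x (List.mem_reverse.mp hx')
              omega
            · have := hstack x hx'
              omega)
          (by
            intro x hx
            have := hpath x hx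
            omega)
          (fun x hx => hpres' x (hpath x hx).1 (hpath x hx).2 (hdead x hx))
          (by simp at hμ ⊢; omega) (by simp at hfA ⊢; omega) (by omega)
        rw [this]
        congr 1
        simp

-- ===== VERDICT (by name: the statement is the Claim_ definition above) =====
theorem eulerian_path_or_cycle_spec : Claim_equal_eulerian_path_or_cycle := by
  intro matrix n _ hpre
  unfold Spec_eulerian_path_or_cycle eulerian_path_or_cycle eulerian_path_or_cycle_alt
  by_cases hodd : (matrix.any (fun w => (w.countP (fun x => 0 < x)) % 2 == 1)) = true
  · rw [if_pos hodd, if_pos hodd]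
  · rw [if_neg hodd, if_neg hodd]
    rcases hpre with h1 | ⟨hne, hsq⟩ | ⟨r, hr, hz⟩
    · exfalso
      apply hodd
      obtain ⟨w, hw, hodd'⟩ := h1
      exact List.any_eq_true.mpr ⟨w, hw, by simpa using hodd'⟩
    · -- square case: the main correspondence
      have h0 : (0:Int).toNat < matrix.length := by
        cases matrix with
        | nil => exact absurd rfl hne
        | cons a l => simp
      have := pv_main (2 * pvAL (matrix.map (fun row => pvNbrsAux 0 row)) + 1)
        matrix [0] [] (2 * pvCountNz matrix + 2) (2 * pvAL (matrix.map (fun row => pvNbrsAux 0 row)) + 2)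
        hsq (by intro x hx; simp at hx; subst hx; exact ⟨le_refl 0, h0⟩)
        (by intro x hx; simp at hx) (by intro x hx; simp at hx)
        (by simp) (by rw [pv_fuel_eq]; simp only [List.length_cons, List.length_nil]; omega) (by omega)
      simpa using congrArg some this
    · -- non-square but first row all zero: both sides stop immediately with [0]
      obtain ⟨t, rfl⟩ : ∃ t, matrix = r :: t := by
        cases matrix with
        | nil => simp at hr
        | cons a l => exact ⟨l, by simpa using congrArg (fun o => o.getD [] :: l) hr⟩
      have hanyr : (r.any fun v => v != 0) = false := by
        simp only [List.any_eq_false]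
        intro x hx
        simp [hz x hx]
      have hrow0 : PySem.List.pyGetD (r :: t) (0 : Int) [] = r :=
        PySem.List.pyGetD_zero_cons _ _ _
      have hA : pvLoopA (2 * pvCountNz (r :: t) + 2) (r :: t) [0] [] = [0] := by
        have : 2 * pvCountNz (r :: t) + 2 = (2 * pvCountNz (r :: t) + 1) + 1 := by omega
        rw [this, pvLoopA_step_neg _ _ _ _ _ (by rw [hrow0]; simp [hanyr]), pvLoopA_nil]
        rfl
      have hadj0 : PySem.List.pyGetD ((r :: t).map (fun row => pvNbrsAux 0 row)) (0 : Int) [] =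
          pvNbrsAux 0 r := by
        simp [PySem.List.pyGetD_zero_cons]
      have hB : pvLoopC (2 * pvAL ((r :: t).map (fun row => pvNbrsAux 0 row)) + 2)
          ((r :: t).map (fun row => pvNbrsAux 0 row)) [0] = [0] := by
        have h2 : 2 * pvAL ((r :: t).map (fun row => pvNbrsAux 0 row)) + 2 =
            (2 * pvAL ((r :: t).map (fun row => pvNbrsAux 0 row)) + 1) + 1 := by omega
        rw [h2]
        simp only [pvLoopC]
        rw [pv_scan_none _ _ (by
          intro x hx
          simp only [List.mem_singleton] at hx
          subst hx
          rw [hadj0]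
          exact (pv_aux_nil_iff 0 r).mpr hanyr)]
      simp only []
      rw [hA, hB]
      rfl
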